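-- pv_equiv track=rewrite | github.com/ChemBioHTP/LassoPred | construc_package/LassoPred_classifier.py | pre_determine_label_for_upper
-- ===== SOURCE A (Python) =====
-- def pre_determine_label_for_upper(split_parts):
--     """Determine the label based on the split parts."""
--     if all(part == 'R' for part in split_parts):
--         return 1
--     elif 'R' in split_parts and 'L' in split_parts:
--         return 1
--     elif all(part == 'L' for part in split_parts):
--         return 1
--     elif 'L' in split_parts and 'T' in split_parts:
--         return 0
--     elif all(part == 'T' for part in split_parts):
--         return 2
--     else:
--         return None
-- ===== SOURCE B (Python) =====
-- def pre_determine_label_for_upper(split_parts):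
--     """Determine the label based on the split parts."""
--     has_r = has_l = has_t = has_other = False
--     for part in split_parts:
--         if part == 'R':
--             has_r = True
--         elif part == 'L':
--             has_l = True
--         elif part == 'T':
--             has_t = True
--         else:
--             has_other = True
--     if has_l:
--         if has_r:
--             return 1
--         if has_t:
--             return 0
--         if has_other:
--             return None
--         return 1
--     if has_other:
--         return None
--     if has_r:
--         return None if has_t else 1
--     if has_t:
--         return 2
--     return 1
-- ===== Notes on version B (the rewrite author's own statement) =====
-- stated objective: alternative
-- what changed: B replaces A's chain of five separate all()/in scans over the list with a single pass that accumulates four presence flags (R, L, T, other) and then a flat decision table on those flags.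
import Mathlib
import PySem

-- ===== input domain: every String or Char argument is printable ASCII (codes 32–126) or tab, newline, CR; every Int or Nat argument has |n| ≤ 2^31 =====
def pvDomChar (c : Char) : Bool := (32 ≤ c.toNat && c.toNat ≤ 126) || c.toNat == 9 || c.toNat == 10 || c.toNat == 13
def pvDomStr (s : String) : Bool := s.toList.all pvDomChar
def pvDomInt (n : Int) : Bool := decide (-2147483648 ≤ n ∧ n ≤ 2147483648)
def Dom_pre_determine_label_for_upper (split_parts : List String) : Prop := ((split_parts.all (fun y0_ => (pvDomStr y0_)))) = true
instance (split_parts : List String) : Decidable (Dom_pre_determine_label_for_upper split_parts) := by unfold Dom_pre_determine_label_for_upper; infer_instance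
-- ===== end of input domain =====

-- B makes one pass accumulating four presence flags (R, L, T, other) and decides by a flat table, instead of A's five separate all()/in scans (objective: alternative).

-- ===== PORT A =====
def pre_determine_label_for_upper (split_parts : List String) : Option Int :=
  if split_parts.all (fun part => part == "R") then some 1
  else if split_parts.contains "R" && split_parts.contains "L" then some 1
  else if split_parts.all (fun part => part == "L") then some 1
  else if split_parts.contains "L" && split_parts.contains "T" then some 0
  else if split_parts.all (fun part => part == "T") then some 2
  else none

-- ===== PORT B =====
-- one pass: accumulate (has_r, has_l, has_t, has_other), exactly Source B's loop body
def pvFlagsStep (f : Bool × Bool × Bool × Bool) (part : String) : Bool × Bool × Bool × Bool :=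
  if part == "R" then (true, f.2.1, f.2.2.1, f.2.2.2)
  else if part == "L" then (f.1, true, f.2.2.1, f.2.2.2)
  else if part == "T" then (f.1, f.2.1, true, f.2.2.2)
  else (f.1, f.2.1, f.2.2.1, true)

def pre_determine_label_for_upper_alt (split_parts : List String) : Option Int :=
  match split_parts.foldl pvFlagsStep (false, false, false, false) with
  | (has_r, has_l, has_t, has_other) =>
    if has_l then
      if has_r then some 1
      else if has_t then some 0
      else if has_other then none
      else some 1
    else if has_other then none
    else if has_r then (if has_t then none else some 1)
    else if has_t then some 2
    else some 1

-- ===== PRECONDITION & SPEC =====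
def Spec_pre_determine_label_for_upper (split_parts : List String) (out : Option Int) : Prop := out = pre_determine_label_for_upper_alt split_parts
instance (split_parts : List String) (out : Option Int) : Decidable (Spec_pre_determine_label_for_upper split_parts out) := by unfold Spec_pre_determine_label_for_upper; infer_instance

-- ===== CLAIM (what is proved, stated in full; the proofs are below) =====
def Claim_equal_pre_determine_label_for_upper : Prop := ∀ (split_parts : List String), Dom_pre_determine_label_for_upper split_parts → Spec_pre_determine_label_for_upper split_parts (pre_determine_label_for_upper split_parts)

-- ===== LEMMAS AND PROOFS =====

-- a string that is none of "R"/"L"/"T"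
def pvOther (p : String) : Bool := !(p == "R" || p == "L" || p == "T")

-- the one-pass fold computes exactly the four presence flags
theorem pvFlags_fold (xs : List String) (a b c d : Bool) :
    xs.foldl pvFlagsStep (a, b, c, d)
      = (a || xs.contains "R", b || xs.contains "L", c || xs.contains "T", d || xs.any pvOther) := by
  induction xs generalizing a b c d with
  | nil => simp
  | cons p xs ih =>
    simp only [List.foldl_cons, List.contains_cons, List.any_cons, pvFlagsStep]
    by_cases hR : p == "R"
    · simp [hR, ih, pvOther, show p = "R" from by simpa using hR]
    · by_cases hL : p == "L"
      · simp [hR, hL, ih, pvOther, show p = "L" from by simpa using hL]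
      · by_cases hT : p == "T"
        · simp [hR, hL, hT, ih, pvOther, show p = "T" from by simpa using hT]
        · simp only [beq_iff_eq] at hR hL hT
          have h1 : ("R" == p) = false := beq_eq_false_iff_ne.mpr (Ne.symm hR)
          have h2 : ("L" == p) = false := beq_eq_false_iff_ne.mpr (Ne.symm hL)
          have h3 : ("T" == p) = false := beq_eq_false_iff_ne.mpr (Ne.symm hT)
          simp [ih, pvOther, hR, hL, hT, h1, h2, h3]

-- elements differing from "R" are exactly the "L"s, "T"s and 'other's
theorem pv_all_R (xs : List String) :
    (xs.all (fun part => part == "R")) = !(xs.contains "L" || xs.contains "T" || xs.any pvOther) := by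
  rw [Bool.eq_iff_iff]
  simp only [List.all_eq_true, beq_iff_eq, Bool.not_eq_true', Bool.or_eq_false_iff,
    List.contains_eq_mem, decide_eq_false_iff_not, List.any_eq_false, pvOther]
  constructor
  · intro h
    exact ⟨⟨fun hL => by simpa using h _ hL, fun hT => by simpa using h _ hT⟩,
      fun p hp => by simp [h p hp]⟩
  · rintro ⟨⟨hL, hT⟩, hO⟩ p hp
    have hx := hO p hp
    by_cases hR : p = "R"
    · exact hR
    · exfalso
      by_cases hLp : p = "L"
      · exact hL (hLp ▸ hp)
      · by_cases hTp : p = "T"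
        · exact hT (hTp ▸ hp)
        · exact hx (by simp [hR, hLp, hTp])

theorem pv_all_L (xs : List String) :
    (xs.all (fun part => part == "L")) = !(xs.contains "R" || xs.contains "T" || xs.any pvOther) := by
  rw [Bool.eq_iff_iff]
  simp only [List.all_eq_true, beq_iff_eq, Bool.not_eq_true', Bool.or_eq_false_iff,
    List.contains_eq_mem, decide_eq_false_iff_not, List.any_eq_false, pvOther]
  constructor
  · intro h
    exact ⟨⟨fun hR => by simpa using h _ hR, fun hT => by simpa using h _ hT⟩,
      fun p hp => by simp [h p hp]⟩
  · rintro ⟨⟨hR, hT⟩, hO⟩ p hp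
    have hx := hO p hp
    by_cases hLp : p = "L"
    · exact hLp
    · exfalso
      by_cases hRp : p = "R"
      · exact hR (hRp ▸ hp)
      · by_cases hTp : p = "T"
        · exact hT (hTp ▸ hp)
        · exact hx (by simp [hRp, hLp, hTp])

theorem pv_all_T (xs : List String) :
    (xs.all (fun part => part == "T")) = !(xs.contains "R" || xs.contains "L" || xs.any pvOther) := by
  rw [Bool.eq_iff_iff]
  simp only [List.all_eq_true, beq_iff_eq, Bool.not_eq_true', Bool.or_eq_false_iff,
    List.contains_eq_mem, decide_eq_false_iff_not, List.any_eq_false, pvOther]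
  constructor
  · intro h
    exact ⟨⟨fun hR => by simpa using h _ hR, fun hL => by simpa using h _ hL⟩,
      fun p hp => by simp [h p hp]⟩
  · rintro ⟨⟨hR, hL⟩, hO⟩ p hp
    have hx := hO p hp
    by_cases hTp : p = "T"
    · exact hTp
    · exfalso
      by_cases hRp : p = "R"
      · exact hR (hRp ▸ hp)
      · by_cases hLp : p = "L"
        · exact hL (hLp ▸ hp)
        · exact hx (by simp [hRp, hLp, hTp])

-- ===== VERDICT (by name: the statement is the Claim_ definition above) =====
theorem pre_determine_label_for_upper_spec : Claim_equal_pre_determine_label_for_upper := by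
  intro xs _
  unfold Spec_pre_determine_label_for_upper
  simp only [pre_determine_label_for_upper, pre_determine_label_for_upper_alt,
    pvFlags_fold, Bool.false_or, pv_all_R, pv_all_L, pv_all_T]
  generalize xs.contains "R" = r
  generalize xs.contains "L" = l
  generalize xs.contains "T" = t
  generalize xs.any pvOther = o
  cases r <;> cases l <;> cases t <;> cases o <;> rfl
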